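-- pv_equiv track=rewrite | github.com/HijackedSlang/AlgoritmoHeuristicoHorariosTesis | Data_Gen_G-Copy1.py | cumple_restricciones_repeticiones
-- ===== SOURCE A (Python) =====
-- def cumple_restricciones_repeticiones(vector):
--     apariciones_y = {}
--     for grupo in vector:
--         for pareja in grupo:
--             if pareja[1] != 0:
--                 apariciones_y[pareja[1]] = apariciones_y.get(pareja[1], 0) + 1
--                 if apariciones_y[pareja[1]] > 3:
--                     return False
--     return True
-- ===== SOURCE B (Python) =====
-- def cumple_restricciones_repeticiones(vector):
--     vals = sorted(p[1] for g in vector for p in g if p[1] != 0)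
--     return all(vals[i] != vals[i + 3] for i in range(len(vals) - 3))
-- ===== Notes on version B (the rewrite author's own statement) =====
-- stated objective: alternative
-- what changed: B sorts the flattened non-zero second components and decides the answer by scanning the sorted list for two equal elements 3 positions apart (a value occurs >3 times iff the sorted list has vals[i] == vals[i+3]), replacing A's incremental dict tally with early exit by a sort-then-scan with no counting at all.
import Mathlib
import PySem

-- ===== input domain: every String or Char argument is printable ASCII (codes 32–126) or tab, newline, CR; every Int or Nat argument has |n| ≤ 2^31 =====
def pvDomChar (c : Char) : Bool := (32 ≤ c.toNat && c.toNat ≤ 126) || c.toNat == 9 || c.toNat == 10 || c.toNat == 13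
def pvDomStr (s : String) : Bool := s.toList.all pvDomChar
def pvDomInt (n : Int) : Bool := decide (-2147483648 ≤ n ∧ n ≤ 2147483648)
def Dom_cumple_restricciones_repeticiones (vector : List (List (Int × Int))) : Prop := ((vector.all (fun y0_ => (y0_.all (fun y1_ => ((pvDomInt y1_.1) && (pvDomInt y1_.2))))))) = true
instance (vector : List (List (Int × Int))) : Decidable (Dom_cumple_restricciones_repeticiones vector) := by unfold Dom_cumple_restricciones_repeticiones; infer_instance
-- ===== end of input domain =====

-- B sorts the flattened non-zero second components and looks for equal elements 3 apart
-- instead of A's interleaved dict tally with an early return: a different (sort-based) algorithm.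

-- ===== PORT A =====
-- inner 'for pareja in grupo' loop; returns none when A's 'return False' fires
def pvAInner (d : PySem.Dict Int Int) : List (Int × Int) → Option (PySem.Dict Int Int)
  | [] => some d
  | p :: rest =>
    if p.2 ≠ 0 then
      let d' := d.insert p.2 (d.getD p.2 0 + 1)
      if 3 < d'.getD p.2 0 then none else pvAInner d' rest
    else pvAInner d rest

-- outer 'for grupo in vector' loop
def pvAOuter (d : PySem.Dict Int Int) : List (List (Int × Int)) → Bool
  | [] => true
  | g :: gs =>
    match pvAInner d g with
    | none => false
    | some d' => pvAOuter d' gs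

def cumple_restricciones_repeticiones (vector : List (List (Int × Int))) : Bool :=
  pvAOuter PySem.Dict.empty vector

-- ===== PORT B =====
-- 'range(len(vals) - 3)' is List.range (vals.length - 3): for len < 3 both are empty, matching
-- Python's empty range on a negative bound; the indices i and i+3 are always in range there,
-- so getD is exact for Python's vals[i] / vals[i+3].
def cumple_restricciones_repeticiones_alt (vector : List (List (Int × Int))) : Bool :=
  let vals := PySem.List.sorted ((vector.flatMap (fun g => g.filter (fun p => p.2 != 0))).map (·.2)) (fun x => x)
  (List.range (vals.length - 3)).all (fun i => vals.getD i 0 != vals.getD (i + 3) 0)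

-- ===== PRECONDITION & SPEC =====
def Spec_cumple_restricciones_repeticiones (vector : List (List (Int × Int))) (out : Bool) : Prop := out = cumple_restricciones_repeticiones_alt vector
instance (vector : List (List (Int × Int))) (out : Bool) : Decidable (Spec_cumple_restricciones_repeticiones vector out) := by unfold Spec_cumple_restricciones_repeticiones; infer_instance

-- ===== CLAIM (what is proved, stated in full; the proofs are below) =====
def Claim_equal_cumple_restricciones_repeticiones : Prop := ∀ (vector : List (List (Int × Int))), Dom_cumple_restricciones_repeticiones vector → Spec_cumple_restricciones_repeticiones vector (cumple_restricciones_repeticiones vector)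

-- ===== LEMMAS AND PROOFS =====

-- the non-zero second components of one group
def pvVals (l : List (Int × Int)) : List Int := (l.filter (fun p => p.2 != 0)).map (·.2)

theorem pvVals_cons_ne (p : Int × Int) (l : List (Int × Int)) (h : p.2 ≠ 0) :
    pvVals (p :: l) = p.2 :: pvVals l := by
  simp [pvVals, h]

theorem pvVals_cons_eq (p : Int × Int) (l : List (Int × Int)) (h : p.2 = 0) :
    pvVals (p :: l) = pvVals l := by
  simp [pvVals, h]

theorem pvAInner_spec (l : List (Int × Int)) (d : PySem.Dict Int Int)
    (h3 : ∀ v, d.getD v 0 ≤ 3) :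
    (pvAInner d l = none ↔ ∃ v, 3 < d.getD v 0 + ((pvVals l).count v : Int)) ∧
    (∀ d', pvAInner d l = some d' →
      ∀ v, d'.getD v 0 = d.getD v 0 + ((pvVals l).count v : Int)) := by
  induction l generalizing d with
  | nil =>
    constructor
    · simp only [pvAInner, pvVals]
      constructor
      · intro h; cases h
      · rintro ⟨v, hv⟩
        simp at hv
        exact absurd hv (not_lt.mpr (h3 v))
    · intro d' hd' v
      simp only [pvAInner] at hd'
      cases hd'
      simp [pvVals]
  | cons p rest ih =>
    by_cases hp : p.2 ≠ 0
    · rw [pvVals_cons_ne p rest hp]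
      by_cases hbig : 3 < (d.insert p.2 (d.getD p.2 0 + 1)).getD p.2 0
      · -- early return False
        have hnone : pvAInner d (p :: rest) = none := by
          simp only [pvAInner, if_pos hp, if_pos hbig]
        rw [hnone]
        constructor
        · constructor
          · intro _
            refine ⟨p.2, ?_⟩
            rw [PySem.Dict.getD_insert_self] at hbig
            have hc : 1 ≤ ((p.2 :: pvVals rest).count p.2 : Int) := by
              have : 1 ≤ (p.2 :: pvVals rest).count p.2 := by
                simp
              exact_mod_cast this
            omega
          · intro _; rfl
        · intro d' hd'; cases hd'
      · -- increment and continue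
        have heq : pvAInner d (p :: rest) = pvAInner (d.insert p.2 (d.getD p.2 0 + 1)) rest := by
          simp only [pvAInner, if_pos hp, if_neg hbig]
        set d' := d.insert p.2 (d.getD p.2 0 + 1) with hd'def
        have h3' : ∀ v, d'.getD v 0 ≤ 3 := by
          intro v
          rw [hd'def, PySem.Dict.getD_insert]
          split_ifs with hv
          · rw [PySem.Dict.getD_insert_self] at hbig; omega
          · exact h3 v
        have key : ∀ v, d'.getD v 0 + ((pvVals rest).count v : Int)
            = d.getD v 0 + (((p.2 :: pvVals rest).count v : Nat) : Int) := by
          intro v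
          rw [hd'def, PySem.Dict.getD_insert, List.count_cons]
          by_cases hv : v = p.2
          · subst hv
            simp only [beq_self_eq_true, if_true]
            push_cast
            omega
          · simp only [beq_iff_eq, hv, if_false]
            push_cast
            omega
        obtain ⟨ihn, ihs⟩ := ih d' h3'
        rw [heq]
        constructor
        · rw [ihn]
          constructor
          · rintro ⟨v, hv⟩; exact ⟨v, by rw [key v] at hv; exact_mod_cast hv⟩
          · rintro ⟨v, hv⟩; refine ⟨v, ?_⟩; rw [key v]; exact_mod_cast hv
        · intro d'' hd'' v
          rw [ihs d'' hd'' v, key v]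
    · push_neg at hp
      rw [pvVals_cons_eq p rest hp]
      have heq : pvAInner d (p :: rest) = pvAInner d rest := by
        simp only [pvAInner, hp]
        norm_num
      rw [heq]
      exact ih d h3

theorem pvAOuter_spec (gs : List (List (Int × Int))) (d : PySem.Dict Int Int)
    (h3 : ∀ v, d.getD v 0 ≤ 3) :
    pvAOuter d gs = true ↔
      ∀ v, d.getD v 0 + (((gs.flatMap (fun g => g.filter (fun p => p.2 != 0))).map (·.2)).count v : Int) ≤ 3 := by
  induction gs generalizing d with
  | nil =>
    constructor
    · intro _ v
      simpa using h3 v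
    · intro _
      rfl
  | cons g gs ih =>
    have hsplit : ((((g :: gs).flatMap (fun g => g.filter (fun p => p.2 != 0))).map (·.2)).count ·)
        = fun v => (pvVals g).count v + (((gs.flatMap (fun g => g.filter (fun p => p.2 != 0))).map (·.2)).count v) := by
      funext v
      simp [pvVals, List.flatMap_cons, List.count_append]
    obtain ⟨hin, hsome⟩ := pvAInner_spec g d h3
    have hstep : pvAOuter d (g :: gs)
        = (match pvAInner d g with | none => false | some d' => pvAOuter d' gs) := rfl
    cases hA : pvAInner d g with
    | none =>
      rw [hstep, hA]
      simp only [Bool.false_eq_true, false_iff]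
      intro hall
      obtain ⟨v, hv⟩ := hin.mp hA
      have := hall v
      rw [congrFun hsplit v] at this
      push_cast at this hv
      have hnn : (0:Int) ≤ (((gs.flatMap (fun g => g.filter (fun p => p.2 != 0))).map (·.2)).count v : Int) := by positivity
      omega
    | some d' =>
      have hstep2 : pvAOuter d (g :: gs) = pvAOuter d' gs := by rw [hstep, hA]
      have hd' : ∀ v, d'.getD v 0 = d.getD v 0 + ((pvVals g).count v : Int) := hsome d' hA
      have hno : ¬ ∃ v, 3 < d.getD v 0 + ((pvVals g).count v : Int) := by
        intro hex
        exact (by simp [hA] : pvAInner d g ≠ none) (hin.mpr hex)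
      push_neg at hno
      have h3' : ∀ v, d'.getD v 0 ≤ 3 := fun v => by rw [hd' v]; exact hno v
      rw [hstep2, ih d' h3']
      constructor
      · intro h v
        have := h v
        rw [hd' v] at this
        rw [congrFun hsplit v]
        push_cast at this ⊢
        omega
      · intro h v
        have := h v
        rw [congrFun hsplit v] at this
        rw [hd' v]
        push_cast at this ⊢
        omega

-- In a ≤-sorted list, no element equals the one 3 positions later iff every value occurs ≤ 3 times.
theorem pvSorted_dist3 (l : List Int) (hs : List.Pairwise (fun a b : Int => a ≤ b) l) :
    ((∀ i, i + 3 < l.length → l.getD i 0 ≠ l.getD (i + 3) 0) ↔ ∀ v : Int, l.count v ≤ 3) := by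
  have hmono : ∀ (i j : ℕ) (_ : i < l.length) (hj : j < l.length), i ≤ j → l[i]'(by omega) ≤ l[j] := by
    intro i j hi hj hij
    rcases Nat.lt_or_ge i j with h | h
    · exact List.pairwise_iff_getElem.mp hs i j hi hj h
    · have : i = j := by omega
      subst this; exact le_refl _
  constructor
  · -- contrapositive: a value with count ≥ 4 yields equal elements 3 apart
    intro hno v
    by_contra hc
    push_neg at hc
    have hsub : (List.replicate 4 v).Sublist l := List.replicate_sublist_iff.mpr hc
    obtain ⟨f, hf⟩ := List.sublist_iff_exists_fin_orderEmbedding_get_eq.mp hsub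
    have hlen : (List.replicate 4 v).length = 4 := by simp
    have f0 : Fin (List.replicate 4 v).length := ⟨0, by omega⟩
    have f3 : Fin (List.replicate 4 v).length := ⟨3, by omega⟩
    have hsm := f.strictMono
    have h01 : (f ⟨0, by omega⟩ : ℕ) < (f ⟨1, by omega⟩ : ℕ) := hsm (by simp)
    have h12 : (f ⟨1, by omega⟩ : ℕ) < (f ⟨2, by omega⟩ : ℕ) := hsm (by simp)
    have h23 : (f ⟨2, by omega⟩ : ℕ) < (f ⟨3, by omega⟩ : ℕ) := hsm (by simp)
    set a : ℕ := (f ⟨0, by omega⟩ : ℕ) with ha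
    set b : ℕ := (f ⟨3, by omega⟩ : ℕ) with hb
    have hblt : b < l.length := (f ⟨3, by omega⟩).isLt
    have halt : a < l.length := (f ⟨0, by omega⟩).isLt
    have hab : a + 3 ≤ b := by omega
    have hva : l[a]'halt = v := by
      have := hf ⟨0, by omega⟩
      simpa [List.get_eq_getElem] using this.symm
    have hvb : l[b]'hblt = v := by
      have := hf ⟨3, by omega⟩
      simpa [List.get_eq_getElem] using this.symm
    have h3lt : a + 3 < l.length := by omega
    have hmid : l[a + 3]'h3lt = v := by
      have h1 : l[a]'halt ≤ l[a + 3]'h3lt := hmono a (a + 3) halt h3lt (by omega)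
      have h2 : l[a + 3]'h3lt ≤ l[b]'hblt := hmono (a + 3) b h3lt hblt hab
      rw [hva] at h1; rw [hvb] at h2
      omega
    have := hno a h3lt
    rw [List.getD_eq_getElem l 0 halt, List.getD_eq_getElem l 0 h3lt, hva, hmid] at this
    exact this rfl
  · -- equal elements 3 apart yield a value with count ≥ 4
    intro hcnt i h3lt heq
    have hi : i < l.length := by omega
    set v : Int := l[i]'hi with hv
    have heq' : l[i + 3]'h3lt = v := by
      rw [List.getD_eq_getElem l 0 hi, List.getD_eq_getElem l 0 h3lt] at heq
      omega
    have hrest : ∀ j, j ≤ 3 → l.getD (i + j) 0 = v := by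
      intro j hj
      have hlt : i + j < l.length := by omega
      rw [List.getD_eq_getElem l 0 hlt]
      have h1 := hmono i (i + j) hi hlt (by omega)
      have h2 := hmono (i + j) (i + 3) hlt h3lt (by omega)
      rw [heq'] at h2
      omega
    have hblock : (l.drop i).take 4 = List.replicate 4 v := by
      apply List.ext_getElem
      · simp; omega
      · intro j hj1 hj2
        have hj : j < 4 := by simpa using hj2
        have hlt : i + j < l.length := by omega
        have e1 : ((l.drop i).take 4)[j]'hj1 = l[i + j]'hlt := by
          simp [List.getElem_take, List.getElem_drop]
        have e2 := hrest j (by omega)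
        rw [List.getD_eq_getElem l 0 hlt] at e2
        rw [e1, e2, List.getElem_replicate]
    have hsub : (List.replicate 4 v).Sublist l := by
      rw [← hblock]
      exact ((l.drop i).take_sublist 4).trans (l.drop_sublist i)
    have := List.replicate_sublist_iff.mp hsub
    have := hcnt v
    omega

-- ===== VERDICT (by name: the statement is the Claim_ definition above) =====
theorem cumple_restricciones_repeticiones_spec : Claim_equal_cumple_restricciones_repeticiones := by
  intro vector _
  unfold Spec_cumple_restricciones_repeticiones
  unfold cumple_restricciones_repeticiones cumple_restricciones_repeticiones_alt
  set valores := (vector.flatMap (fun g => g.filter (fun p => p.2 != 0))).map (·.2) with hval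
  set vals := PySem.List.sorted valores (fun x => x) with hvals
  have hperm : vals.Perm valores := PySem.List.sorted_perm valores (fun x => x) false
  have hpair : List.Pairwise (fun a b : Int => a ≤ b) vals := by
    simpa using PySem.List.sorted_pairwise valores (fun x : Int => x)
  have hempty : ∀ v : Int, (PySem.Dict.empty : PySem.Dict Int Int).getD v 0 ≤ 3 := by
    intro v; simp [PySem.Dict.getD_empty]
  have hA := pvAOuter_spec vector PySem.Dict.empty hempty
  simp only [PySem.Dict.getD_empty, zero_add] at hA
  rw [← hval] at hA
  have hAcount : pvAOuter PySem.Dict.empty vector = true ↔ ∀ v : Int, vals.count v ≤ 3 := by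
    rw [hA]
    constructor
    · intro h v
      have := h v
      rw [hperm.count_eq]
      exact_mod_cast this
    · intro h v
      have := h v
      rw [hperm.count_eq] at this
      exact_mod_cast this
  have hB : ((List.range (vals.length - 3)).all
        (fun i => vals.getD i 0 != vals.getD (i + 3) 0) = true)
      ↔ ∀ i, i + 3 < vals.length → vals.getD i 0 ≠ vals.getD (i + 3) 0 := by
    rw [List.all_eq_true]
    constructor
    · intro h i hi
      have := h i (List.mem_range.mpr (by omega))
      simpa using this
    · intro h i hmem
      have hi := List.mem_range.mp hmem
      simpa using h i (by omega)
  have hbridge := pvSorted_dist3 vals hpair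
  cases hAB : pvAOuter PySem.Dict.empty vector with
  | true =>
    exact ((hB.mpr (hbridge.mpr (hAcount.mp hAB)))).symm
  | false =>
    cases hBv : (List.range (vals.length - 3)).all
        (fun i => vals.getD i 0 != vals.getD (i + 3) 0) with
    | false => rfl
    | true =>
      exact absurd (hAcount.mpr (hbridge.mp (hB.mp hBv))) (by simp [hAB])
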